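-- pv_equiv track=rewrite | github.com/mageshyt/INTERVIEW-PREP | lintcoder/13.build-wall.py | calculate_row_ways
-- ===== SOURCE A (Python) =====
-- MOD = 1000000007
--
-- def calculate_row_ways(m):
--     ways = [0] * (m + 1)
--     ways[0] = 1
--     for i in range(1, m + 1):
--         if i >= 1:
--             ways[i] = (ways[i] + ways[i - 1]) % MOD
--         if i >= 2:
--             ways[i] = (ways[i] + ways[i - 2]) % MOD
--         if i >= 3:
--             ways[i] = (ways[i] + ways[i - 3]) % MOD
--         if i >= 4:
--             ways[i] = (ways[i] + ways[i - 4]) % MOD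
--     return ways[m]
-- ===== SOURCE B (Python) =====
-- MOD = 1000000007
--
-- def _mat_mul(A, B):
--     (a00, a01, a02, a03,
--      a10, a11, a12, a13,
--      a20, a21, a22, a23,
--      a30, a31, a32, a33) = A
--     (b00, b01, b02, b03,
--      b10, b11, b12, b13,
--      b20, b21, b22, b23,
--      b30, b31, b32, b33) = B
--     return ((a00*b00 + a01*b10 + a02*b20 + a03*b30) % MOD,
--             (a00*b01 + a01*b11 + a02*b21 + a03*b31) % MOD,
--             (a00*b02 + a01*b12 + a02*b22 + a03*b32) % MOD,
--             (a00*b03 + a01*b13 + a02*b23 + a03*b33) % MOD,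
--             (a10*b00 + a11*b10 + a12*b20 + a13*b30) % MOD,
--             (a10*b01 + a11*b11 + a12*b21 + a13*b31) % MOD,
--             (a10*b02 + a11*b12 + a12*b22 + a13*b32) % MOD,
--             (a10*b03 + a11*b13 + a12*b23 + a13*b33) % MOD,
--             (a20*b00 + a21*b10 + a22*b20 + a23*b30) % MOD,
--             (a20*b01 + a21*b11 + a22*b21 + a23*b31) % MOD,
--             (a20*b02 + a21*b12 + a22*b22 + a23*b32) % MOD,
--             (a20*b03 + a21*b13 + a22*b23 + a23*b33) % MOD,
--             (a30*b00 + a31*b10 + a32*b20 + a33*b30) % MOD,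
--             (a30*b01 + a31*b11 + a32*b21 + a33*b31) % MOD,
--             (a30*b02 + a31*b12 + a32*b22 + a33*b32) % MOD,
--             (a30*b03 + a31*b13 + a32*b23 + a33*b33) % MOD)
--
-- def calculate_row_ways(m):
--     # tetranacci recurrence mod MOD (each count is the sum of the four previous ones,
--     # seeded by the single empty tiling); the answer is the top-left entry of T**m for
--     # the companion matrix T, computed by binary exponentiation.
--     R = (1, 0, 0, 0,
--          0, 1, 0, 0,
--          0, 0, 1, 0,
--          0, 0, 0, 1)
--     T = (1, 1, 1, 1,
--          1, 0, 0, 0,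
--          0, 1, 0, 0,
--          0, 0, 1, 0)
--     e = m
--     while e > 0:
--         if e % 2 == 1:
--             R = _mat_mul(R, T)
--         T = _mat_mul(T, T)
--         e //= 2
--     return R[0]
-- ===== Notes on version B (the rewrite author's own statement) =====
-- stated objective: faster
-- what changed: Replaces A's O(m) dynamic-programming array sweep with binary exponentiation of the 4x4 companion matrix of the tetranacci recurrence, reducing the work to O(log m) modular matrix multiplications.
import Mathlib
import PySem

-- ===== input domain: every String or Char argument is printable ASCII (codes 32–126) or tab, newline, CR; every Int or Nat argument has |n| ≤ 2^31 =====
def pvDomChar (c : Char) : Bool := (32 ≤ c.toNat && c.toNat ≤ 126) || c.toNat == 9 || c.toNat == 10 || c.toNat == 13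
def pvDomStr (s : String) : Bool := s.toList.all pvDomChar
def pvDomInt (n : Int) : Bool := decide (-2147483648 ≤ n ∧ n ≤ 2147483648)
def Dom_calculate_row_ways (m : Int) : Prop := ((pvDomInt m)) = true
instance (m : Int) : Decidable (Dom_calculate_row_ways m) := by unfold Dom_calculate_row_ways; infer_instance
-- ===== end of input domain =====

-- B replaces A's O(m) dynamic-programming sweep by binary exponentiation of the 4x4
-- companion matrix of the tetranacci recurrence (objective: faster, asymptotic O(log m)).

def pvMOD : Int := 1000000007

-- ===== PORT A =====
-- the ways buffer is an Array (a Python list is an O(1)-indexed buffer); every index A uses is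
-- nonnegative and in range on the admitted inputs (m ≥ 0 and the i ≥ k guards), where these two
-- helpers are exactly Python's ways[i] read/write
def pvGetA (a : Array Int) (i : Int) : Int := a.getD i.toNat 0
def pvSetA (a : Array Int) (i : Int) (v : Int) : Array Int := a.setIfInBounds i.toNat v

-- one iteration of A's `for i in range(1, m+1)` body (four guarded read-modify-writes of ways[i])
def pvAStep (ways : Array Int) (i : Int) : Array Int :=
  let ways := if 1 ≤ i then pvSetA ways i (PySem.Int.mod (pvGetA ways i + pvGetA ways (i-1)) pvMOD) else ways
  let ways := if 2 ≤ i then pvSetA ways i (PySem.Int.mod (pvGetA ways i + pvGetA ways (i-2)) pvMOD) else ways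
  let ways := if 3 ≤ i then pvSetA ways i (PySem.Int.mod (pvGetA ways i + pvGetA ways (i-3)) pvMOD) else ways
  let ways := if 4 ≤ i then pvSetA ways i (PySem.Int.mod (pvGetA ways i + pvGetA ways (i-4)) pvMOD) else ways
  ways

def calculate_row_ways (m : Int) : Int :=
  let ways : Array Int := (List.replicate (m+1).toNat 0).toArray   -- ways = [0] * (m + 1)
  let ways := pvSetA ways 0 1                              -- ways[0] = 1 (IndexError when m < 0: excluded by Pre_)
  let ways := (PySem.List.pyRange 1 (m+1) 1).foldl pvAStep ways
  pvGetA ways m                                            -- return ways[m]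

-- ===== PORT B =====
-- a 4x4 integer matrix as a flat 16-tuple, row major (Source B's tuple of 16 entries)
abbrev pvMat : Type := Int × Int × Int × Int × Int × Int × Int × Int × Int × Int × Int × Int × Int × Int × Int × Int

def pvMatMul (A B : pvMat) : pvMat :=
  match A, B with
  | (a00, a01, a02, a03, a10, a11, a12, a13, a20, a21, a22, a23, a30, a31, a32, a33), (b00, b01, b02, b03, b10, b11, b12, b13, b20, b21, b22, b23, b30, b31, b32, b33) =>
    (PySem.Int.mod (a00*b00 + a01*b10 + a02*b20 + a03*b30) pvMOD,
     PySem.Int.mod (a00*b01 + a01*b11 + a02*b21 + a03*b31) pvMOD,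
     PySem.Int.mod (a00*b02 + a01*b12 + a02*b22 + a03*b32) pvMOD,
     PySem.Int.mod (a00*b03 + a01*b13 + a02*b23 + a03*b33) pvMOD,
     PySem.Int.mod (a10*b00 + a11*b10 + a12*b20 + a13*b30) pvMOD,
     PySem.Int.mod (a10*b01 + a11*b11 + a12*b21 + a13*b31) pvMOD,
     PySem.Int.mod (a10*b02 + a11*b12 + a12*b22 + a13*b32) pvMOD,
     PySem.Int.mod (a10*b03 + a11*b13 + a12*b23 + a13*b33) pvMOD,
     PySem.Int.mod (a20*b00 + a21*b10 + a22*b20 + a23*b30) pvMOD,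
     PySem.Int.mod (a20*b01 + a21*b11 + a22*b21 + a23*b31) pvMOD,
     PySem.Int.mod (a20*b02 + a21*b12 + a22*b22 + a23*b32) pvMOD,
     PySem.Int.mod (a20*b03 + a21*b13 + a22*b23 + a23*b33) pvMOD,
     PySem.Int.mod (a30*b00 + a31*b10 + a32*b20 + a33*b30) pvMOD,
     PySem.Int.mod (a30*b01 + a31*b11 + a32*b21 + a33*b31) pvMOD,
     PySem.Int.mod (a30*b02 + a31*b12 + a32*b22 + a33*b32) pvMOD,
     PySem.Int.mod (a30*b03 + a31*b13 + a32*b23 + a33*b33) pvMOD)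

-- Source B's `while e > 0` loop; Python's e % 2 / e //= 2 on e > 0 agree with Nat % and /;
-- for e ≤ 0 the loop never runs, so running it on e.toNat is exact on every Int exponent.
def pvMatPowLoop (R T : pvMat) (e : Nat) : pvMat :=
  if e = 0 then R
  else pvMatPowLoop (if e % 2 = 1 then pvMatMul R T else R) (pvMatMul T T) (e / 2)
termination_by e
decreasing_by omega

def calculate_row_ways_alt (m : Int) : Int :=
  (pvMatPowLoop
    (1, 0, 0, 0,
     0, 1, 0, 0,
     0, 0, 1, 0,
     0, 0, 0, 1)
    (1, 1, 1, 1,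
     1, 0, 0, 0,
     0, 1, 0, 0,
     0, 0, 1, 0)
    m.toNat).1

-- ===== PRECONDITION & SPEC =====
-- A raises IndexError on m < 0 (ways = [] there, so `ways[0] = 1` fails); Pre_ excludes exactly those.
def Pre_calculate_row_ways (m : Int) : Prop := 0 ≤ m
instance (m : Int) : Decidable (Pre_calculate_row_ways m) := by unfold Pre_calculate_row_ways; infer_instance
def pvWitness_calculate_row_ways : Int := (5)

def Spec_calculate_row_ways (m : Int) (out : Int) : Prop := out = calculate_row_ways_alt m
instance (m : Int) (out : Int) : Decidable (Spec_calculate_row_ways m out) := by unfold Spec_calculate_row_ways; infer_instance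

-- ===== CLAIM (what is proved, stated in full; the proofs are below) =====
def Claim_equal_calculate_row_ways : Prop := ∀ (m : Int), Dom_calculate_row_ways m → Pre_calculate_row_ways m → Spec_calculate_row_ways m (calculate_row_ways m)

-- ===== LEMMAS AND PROOFS =====

-- the exact tetranacci window (f n, f (n-1), f (n-2), f (n-3)) over ℤ, no reduction
def pvQuad : Nat → Int × Int × Int × Int
  | 0 => (1, 0, 0, 0)
  | n+1 => ((pvQuad n).1 + (pvQuad n).2.1 + (pvQuad n).2.2.1 + (pvQuad n).2.2.2,
            (pvQuad n).1, (pvQuad n).2.1, (pvQuad n).2.2.1)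

-- the value A stores in ways[n]
def pvG (n : Nat) : Int := (pvQuad n).1 % pvMOD

-- A's list after the iterations i = 1 .. n (length m+1 = N)
def pvFState (N n : Nat) : List Int := (List.range N).map (fun j => if j ≤ n then pvG j else 0)

-- unreduced matrix product and entrywise reduction
def pvMatMulZ (A B : pvMat) : pvMat :=
  match A, B with
  | (a00, a01, a02, a03, a10, a11, a12, a13, a20, a21, a22, a23, a30, a31, a32, a33), (b00, b01, b02, b03, b10, b11, b12, b13, b20, b21, b22, b23, b30, b31, b32, b33) =>
    ((a00*b00 + a01*b10 + a02*b20 + a03*b30),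
     (a00*b01 + a01*b11 + a02*b21 + a03*b31),
     (a00*b02 + a01*b12 + a02*b22 + a03*b32),
     (a00*b03 + a01*b13 + a02*b23 + a03*b33),
     (a10*b00 + a11*b10 + a12*b20 + a13*b30),
     (a10*b01 + a11*b11 + a12*b21 + a13*b31),
     (a10*b02 + a11*b12 + a12*b22 + a13*b32),
     (a10*b03 + a11*b13 + a12*b23 + a13*b33),
     (a20*b00 + a21*b10 + a22*b20 + a23*b30),
     (a20*b01 + a21*b11 + a22*b21 + a23*b31),
     (a20*b02 + a21*b12 + a22*b22 + a23*b32),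
     (a20*b03 + a21*b13 + a22*b23 + a23*b33),
     (a30*b00 + a31*b10 + a32*b20 + a33*b30),
     (a30*b01 + a31*b11 + a32*b21 + a33*b31),
     (a30*b02 + a31*b12 + a32*b22 + a33*b32),
     (a30*b03 + a31*b13 + a32*b23 + a33*b33))

def pvRed (A : pvMat) : pvMat :=
  match A with
  | (a00, a01, a02, a03, a10, a11, a12, a13, a20, a21, a22, a23, a30, a31, a32, a33) => (a00 % pvMOD,
     a01 % pvMOD,
     a02 % pvMOD,
     a03 % pvMOD,
     a10 % pvMOD,
     a11 % pvMOD,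
     a12 % pvMOD,
     a13 % pvMOD,
     a20 % pvMOD,
     a21 % pvMOD,
     a22 % pvMOD,
     a23 % pvMOD,
     a30 % pvMOD,
     a31 % pvMOD,
     a32 % pvMOD,
     a33 % pvMOD)

-- integer powers of the companion matrix
def pvPZ : Nat → pvMat
  | 0 => (1, 0, 0, 0, 0, 1, 0, 0, 0, 0, 1, 0, 0, 0, 0, 1)
  | n+1 => pvMatMulZ (1, 1, 1, 1, 1, 0, 0, 0, 0, 1, 0, 0, 0, 0, 1, 0) (pvPZ n)

lemma pvMod_eq (a : Int) : PySem.Int.mod a pvMOD = a % pvMOD :=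
  PySem.Int.mod_eq_emod_of_pos (by norm_num [pvMOD])

lemma pvEntry (p a b c d e f g h : Int) :
    ((a % p) * (e % p) + (b % p) * (f % p) + (c % p) * (g % p) + (d % p) * (h % p)) % p
      = (a * e + b * f + c * g + d * h) % p := by
  have H : ∀ x : Int, x % p ≡ x [ZMOD p] := fun x => Int.emod_emod_of_dvd x dvd_rfl
  exact ((((H a).mul (H e)).add ((H b).mul (H f))).add ((H c).mul (H g))).add ((H d).mul (H h))

lemma pvMatMul_eq_red (A B : pvMat) : pvMatMul A B = pvRed (pvMatMulZ A B) := by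
  obtain ⟨a00, a01, a02, a03, a10, a11, a12, a13, a20, a21, a22, a23, a30, a31, a32, a33⟩ := A
  obtain ⟨b00, b01, b02, b03, b10, b11, b12, b13, b20, b21, b22, b23, b30, b31, b32, b33⟩ := B
  simp only [pvMatMul, pvMatMulZ, pvRed, pvMod_eq]

lemma pvRed_mul_red (A B : pvMat) : pvMatMul (pvRed A) (pvRed B) = pvMatMul A B := by
  obtain ⟨a00, a01, a02, a03, a10, a11, a12, a13, a20, a21, a22, a23, a30, a31, a32, a33⟩ := A
  obtain ⟨b00, b01, b02, b03, b10, b11, b12, b13, b20, b21, b22, b23, b30, b31, b32, b33⟩ := B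
  simp only [pvMatMul, pvRed, pvMod_eq, Prod.mk.injEq]
  and_intros <;> exact pvEntry _ _ _ _ _ _ _ _ _

lemma pvMatMulZ_assoc (A B C : pvMat) : pvMatMulZ (pvMatMulZ A B) C = pvMatMulZ A (pvMatMulZ B C) := by
  obtain ⟨a00, a01, a02, a03, a10, a11, a12, a13, a20, a21, a22, a23, a30, a31, a32, a33⟩ := A
  obtain ⟨b00, b01, b02, b03, b10, b11, b12, b13, b20, b21, b22, b23, b30, b31, b32, b33⟩ := B
  obtain ⟨c00,c01,c02,c03,c10,c11,c12,c13,c20,c21,c22,c23,c30,c31,c32,c33⟩ := C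
  simp only [pvMatMulZ, Prod.mk.injEq]
  and_intros <;> ring

lemma pvMatMulZ_one_left (A : pvMat) : pvMatMulZ (pvPZ 0) A = A := by
  obtain ⟨a00, a01, a02, a03, a10, a11, a12, a13, a20, a21, a22, a23, a30, a31, a32, a33⟩ := A
  simp only [pvPZ, pvMatMulZ, Prod.mk.injEq]
  and_intros <;> ring

lemma pvPZ_add (a b : Nat) : pvMatMulZ (pvPZ a) (pvPZ b) = pvPZ (a + b) := by
  induction a with
  | zero => simp [pvMatMulZ_one_left]
  | succ a ih =>
    rw [show a + 1 + b = (a + b) + 1 from by omega]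
    show pvMatMulZ (pvMatMulZ (1, 1, 1, 1, 1, 0, 0, 0, 0, 1, 0, 0, 0, 0, 1, 0) (pvPZ a)) (pvPZ b)
        = pvPZ ((a + b) + 1)
    rw [pvMatMulZ_assoc, ih]
    rfl

lemma pvLoop_spec : ∀ (e a k : Nat),
    pvMatPowLoop (pvRed (pvPZ a)) (pvRed (pvPZ k)) e = pvRed (pvPZ (a + k * e)) := by
  intro e
  induction e using Nat.strong_induction_on with
  | _ e ih =>
    intro a k
    rw [pvMatPowLoop]
    by_cases h0 : e = 0
    · simp [h0]
    · rw [if_neg h0]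
      have h2 : e / 2 < e := Nat.div_lt_self (Nat.pos_of_ne_zero h0) one_lt_two
      have hmm : pvMatMul (pvRed (pvPZ k)) (pvRed (pvPZ k)) = pvRed (pvPZ (k + k)) := by
        rw [pvRed_mul_red, pvMatMul_eq_red, pvPZ_add]
      by_cases hp : e % 2 = 1
      · rw [if_pos hp, pvRed_mul_red, pvMatMul_eq_red, pvPZ_add, hmm, ih (e / 2) h2 (a + k) (k + k)]
        congr 2
        obtain ⟨q, hq⟩ : ∃ q, e = 2 * q + 1 := ⟨e / 2, by omega⟩
        subst hq
        rw [show (2 * q + 1) / 2 = q from by omega]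
        ring
      · rw [if_neg hp, hmm, ih (e / 2) h2 a (k + k)]
        congr 2
        obtain ⟨q, hq⟩ : ∃ q, e = 2 * q := ⟨e / 2, by omega⟩
        subst hq
        rw [show 2 * q / 2 = q from by omega]
        ring

lemma pvPZ_col0 (n : Nat) :
    (pvPZ n).1 = (pvQuad n).1 ∧ (pvPZ n).2.2.2.2.1 = (pvQuad n).2.1 ∧
      (pvPZ n).2.2.2.2.2.2.2.2.1 = (pvQuad n).2.2.1 ∧
      (pvPZ n).2.2.2.2.2.2.2.2.2.2.2.2.1 = (pvQuad n).2.2.2 := by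
  induction n with
  | zero => simp [pvPZ, pvQuad]
  | succ n ih =>
    rcases h : pvPZ n with ⟨x00, x01, x02, x03, x10, x11, x12, x13, x20, x21, x22, x23, x30, x31, x32, x33⟩
    rw [h] at ih
    simp only [pvPZ, pvQuad, h, pvMatMulZ] at *
    obtain ⟨e1, e2, e3, e4⟩ := ih
    refine ⟨?_, ?_, ?_, ?_⟩ <;> simp [e1, e2, e3, e4]

lemma pvB_eq (m : Int) : calculate_row_ways_alt m = pvG m.toNat := by
  have hI : ((1, 0, 0, 0, 0, 1, 0, 0, 0, 0, 1, 0, 0, 0, 0, 1) : pvMat) = pvRed (pvPZ 0) := by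
    norm_num [pvRed, pvPZ, pvMOD]
  have hT : ((1, 1, 1, 1, 1, 0, 0, 0, 0, 1, 0, 0, 0, 0, 1, 0) : pvMat) = pvRed (pvPZ 1) := by
    norm_num [pvRed, pvPZ, pvMatMulZ, pvMOD]
  show (pvMatPowLoop _ _ m.toNat).1 = pvG m.toNat
  rw [hI, hT, pvLoop_spec m.toNat 0 1]
  rw [show 0 + 1 * m.toNat = m.toNat from by omega]
  rcases h : pvPZ m.toNat with ⟨x, rest⟩
  have h1 := (pvPZ_col0 m.toNat).1
  rw [h] at h1
  simp only at h1
  obtain ⟨r2, rest⟩ := rest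
  simp only [pvRed, pvG, h1]

lemma pvGetA_toArray (l : List Int) (i : Nat) : pvGetA l.toArray ((i : Nat) : Int) = l.getD i 0 := by
  unfold pvGetA
  rw [show ((i : Nat) : Int).toNat = i from by omega]
  rcases Nat.lt_or_ge i l.length with h | h
  · simp [Array.getD, h, List.getD_eq_getElem?_getD]
  · simp [Array.getD, Nat.not_lt.2 h]

lemma pvSetA_toArray (l : List Int) (i : Nat) (v : Int) :
    pvSetA l.toArray ((i : Nat) : Int) v = (l.set i v).toArray := by
  unfold pvSetA
  rw [show ((i : Nat) : Int).toNat = i from by omega]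
  exact List.setIfInBounds_toArray l i v

lemma pvW (g : Nat → Int) (N i : Nat) (v : Int) :
    pvSetA ((List.range N).map g).toArray ((i : Nat) : Int) v
      = ((List.range N).map (fun j => if j = i then v else g j)).toArray := by
  rw [pvSetA_toArray]
  congr 1
  apply List.ext_getElem (by simp)
  intro k h1 h2
  simp only [List.getElem_set, List.getElem_map, List.getElem_range]
  split_ifs with h3 h4 <;> first | rfl | omega

lemma pvR (g : Nat → Int) (N j : Nat) :
    pvGetA ((List.range N).map g).toArray ((j : Nat) : Int)
      = if j < N then g j else 0 := by
  rw [pvGetA_toArray]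
  by_cases hj : j < N
  · rw [PySem.List.getD_map_range _ _ _ _ hj, if_pos hj]
  · rw [if_neg hj, List.getD_eq_default]
    simp only [List.length_map, List.length_range]
    omega

lemma pvAddMod (x y : Int) : (x + y % pvMOD) % pvMOD = (x + y) % pvMOD := by
  rw [Int.add_emod, Int.emod_emod_of_dvd _ dvd_rfl, ← Int.add_emod]

lemma pvModAdd (x y : Int) : (x % pvMOD + y) % pvMOD = (x + y) % pvMOD := by
  rw [Int.add_emod, Int.emod_emod_of_dvd _ dvd_rfl, ← Int.add_emod]

lemma pvAStep_state (N n : Nat) (h : n + 1 < N) :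
    pvAStep (pvFState N n).toArray ((n : Int) + 1) = (pvFState N (n + 1)).toArray := by
  unfold pvFState
  rcases n with _ | _ | _ | k
  · -- n = 0, i = 1: only the first guard fires
    simp only [pvAStep]
    rw [show ((0 : Nat) : Int) + 1 = ((1 : Nat) : Int) from by omega]
    rw [if_pos (by omega : (1 : Int) ≤ ((1 : Nat) : Int))]
    rw [show ((1 : Nat) : Int) - 1 = ((0 : Nat) : Int) from by omega]
    rw [if_neg (by omega : ¬ (2 : Int) ≤ ((1 : Nat) : Int)),
        if_neg (by omega : ¬ (3 : Int) ≤ ((1 : Nat) : Int)),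
        if_neg (by omega : ¬ (4 : Int) ≤ ((1 : Nat) : Int))]
    simp only [pvR, pvW, if_pos (show 1 < N by omega), if_pos (show 0 < N by omega)]
    congr 1
    apply List.map_congr_left
    intro j hj
    simp only [List.mem_range] at hj
    by_cases hjk : j = 1
    · subst hjk
      norm_num [pvG, pvQuad, pvMod_eq, pvMOD]
    · rw [if_neg hjk]
      split_ifs <;> first | rfl | omega
  · -- n = 1, i = 2
    simp only [pvAStep]
    rw [show ((1 : Nat) : Int) + 1 = ((2 : Nat) : Int) from by omega]
    rw [if_pos (by omega : (1 : Int) ≤ ((2 : Nat) : Int))]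
    rw [show ((2 : Nat) : Int) - 1 = ((1 : Nat) : Int) from by omega]
    rw [if_pos (by omega : (2 : Int) ≤ ((2 : Nat) : Int))]
    rw [show ((2 : Nat) : Int) - 2 = ((0 : Nat) : Int) from by omega]
    rw [if_neg (by omega : ¬ (3 : Int) ≤ ((2 : Nat) : Int)),
        if_neg (by omega : ¬ (4 : Int) ≤ ((2 : Nat) : Int))]
    simp only [pvR, pvW, if_pos (show 2 < N by omega), if_pos (show 1 < N by omega),
      if_pos (show 0 < N by omega)]
    congr 1
    apply List.map_congr_left
    intro j hj
    simp only [List.mem_range] at hj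
    by_cases hjk : j = 2
    · subst hjk
      norm_num [pvG, pvQuad, pvMod_eq, pvMOD]
    · rw [if_neg hjk, if_neg hjk]
      split_ifs <;> first | rfl | omega
  · -- n = 2, i = 3
    simp only [pvAStep]
    rw [show ((2 : Nat) : Int) + 1 = ((3 : Nat) : Int) from by omega]
    rw [if_pos (by omega : (1 : Int) ≤ ((3 : Nat) : Int))]
    rw [show ((3 : Nat) : Int) - 1 = ((2 : Nat) : Int) from by omega]
    rw [if_pos (by omega : (2 : Int) ≤ ((3 : Nat) : Int))]
    rw [show ((3 : Nat) : Int) - 2 = ((1 : Nat) : Int) from by omega]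
    rw [if_pos (by omega : (3 : Int) ≤ ((3 : Nat) : Int))]
    rw [show ((3 : Nat) : Int) - 3 = ((0 : Nat) : Int) from by omega]
    rw [if_neg (by omega : ¬ (4 : Int) ≤ ((3 : Nat) : Int))]
    simp only [pvR, pvW, if_pos (show 3 < N by omega), if_pos (show 2 < N by omega),
      if_pos (show 1 < N by omega), if_pos (show 0 < N by omega)]
    congr 1
    apply List.map_congr_left
    intro j hj
    simp only [List.mem_range] at hj
    by_cases hjk : j = 3
    · subst hjk
      norm_num [pvG, pvQuad, pvMod_eq, pvMOD]
    · rw [if_neg hjk, if_neg hjk, if_neg hjk]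
      split_ifs <;> first | rfl | omega
  · -- n = k + 3, i = k + 4: all four guards fire
    simp only [pvAStep]
    rw [show ((k + 3 : Nat) : Int) + 1 = ((k + 4 : Nat) : Int) from by omega]
    rw [if_pos (by omega : (1 : Int) ≤ ((k + 4 : Nat) : Int))]
    rw [show ((k + 4 : Nat) : Int) - 1 = ((k + 3 : Nat) : Int) from by omega]
    rw [if_pos (by omega : (2 : Int) ≤ ((k + 4 : Nat) : Int))]
    rw [show ((k + 4 : Nat) : Int) - 2 = ((k + 2 : Nat) : Int) from by omega]
    rw [if_pos (by omega : (3 : Int) ≤ ((k + 4 : Nat) : Int))]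
    rw [show ((k + 4 : Nat) : Int) - 3 = ((k + 1 : Nat) : Int) from by omega]
    rw [if_pos (by omega : (4 : Int) ≤ ((k + 4 : Nat) : Int))]
    rw [show ((k + 4 : Nat) : Int) - 4 = ((k : Nat) : Int) from by omega]
    simp only [pvR, pvW, if_pos (show k + 4 < N by omega), if_pos (show k + 3 < N by omega),
      if_pos (show k + 2 < N by omega), if_pos (show k + 1 < N by omega),
      if_pos (show k < N by omega),
      if_neg (show ¬ (k + 2 = k + 4) by omega),
      if_neg (show ¬ (k + 1 = k + 4) by omega), if_neg (show ¬ (k = k + 4) by omega),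
      if_pos (show k + 3 ≤ k + 3 by omega), if_pos (show k + 2 ≤ k + 3 by omega),
      if_pos (show k + 1 ≤ k + 3 by omega), if_pos (show k ≤ k + 3 by omega)]
    congr 1
    apply List.map_congr_left
    intro j hj
    simp only [List.mem_range] at hj
    by_cases hjk : j = k + 4
    · subst hjk
      simp only [pvG, pvMod_eq, pvQuad,
        if_neg (show ¬ (k + 4 ≤ k + 1 + 1 + 1) from by omega)]
      norm_num [pvAddMod, pvModAdd]
    · rw [if_neg hjk, if_neg hjk, if_neg hjk, if_neg hjk]
      split_ifs <;> first | rfl | omega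

lemma pvA_eq (m : Int) (hm : 0 ≤ m) : calculate_row_ways m = pvG m.toNat := by
  obtain ⟨n, rfl⟩ : ∃ n : Nat, m = (n : Int) := ⟨m.toNat, by omega⟩
  have hN : (((n : Int)) + 1).toNat = n + 1 := by omega
  have hinit : pvSetA (List.replicate (n + 1) (0 : Int)).toArray 0 1 = (pvFState (n + 1) 0).toArray := by
    rw [show (0 : Int) = ((0 : Nat) : Int) from rfl, pvSetA_toArray]
    congr 1
    apply List.ext_getElem (by simp [pvFState])
    intro k h1 h2
    simp only [pvFState, List.getElem_set, List.getElem_replicate, List.getElem_map,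
      List.getElem_range]
    split_ifs with h3 h4
    · subst h3
      norm_num [pvG, pvQuad, pvMOD]
    · omega
    · omega
    · rfl
  have hfold : ∀ t : Nat, t ≤ n →
      (PySem.List.pyRange 1 ((t : Int) + 1) 1).foldl pvAStep (pvFState (n + 1) 0).toArray
        = (pvFState (n + 1) t).toArray := by
    intro t
    induction t with
    | zero =>
      intro _
      rw [show ((0 : Nat) : Int) + 1 = 1 from by norm_num, PySem.List.pyRange_one_eq_nil (by norm_num)]
      rfl
    | succ t ih =>
      intro ht
      rw [show (((t + 1 : Nat) : Int)) + 1 = ((t : Int) + 1) + 1 from by push_cast; ring,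
        PySem.List.pyRange_one_succ_right (by omega), List.foldl_append, ih (by omega)]
      exact pvAStep_state (n + 1) t (by omega)
  show pvGetA
      ((PySem.List.pyRange 1 ((n : Int) + 1) 1).foldl pvAStep
        (pvSetA (List.replicate (((n : Int)) + 1).toNat 0).toArray 0 1)) ((n : Int))
      = pvG ((n : Int)).toNat
  rw [hN, hinit, hfold n le_rfl]
  unfold pvFState
  rw [pvR]
  simp

-- ===== VERDICT (by name: the statement is the Claim_ definition above) =====
theorem calculate_row_ways_spec : Claim_equal_calculate_row_ways := by
  intro m _ hpre
  unfold Spec_calculate_row_ways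
  rw [pvA_eq m hpre, pvB_eq]
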